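-- pv_equiv track=rewrite | github.com/WangTX1128/LAMOST- | function.py | accuracy_of_label
-- ===== SOURCE A (Python) =====
-- def accuracy_of_label(true_list, pred_list):
--     A_error = 0
--     F_error = 0
--     G_error = 0
--     K_error = 0
--     for i in range(len(true_list)):
--         if true_list[i] == 0 and pred_list[i] != 0:
--             A_error += 1
--         if true_list[i] == 1 and pred_list[i] != 1:
--             F_error += 1
--         if true_list[i] == 2 and pred_list[i] != 2:
--             G_error += 1
--         if true_list[i] == 3 and pred_list[i] != 3:
--             K_error += 1
--     return A_error, F_error, G_error, K_error
-- ===== SOURCE B (Python) =====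
-- def accuracy_of_label(true_list, pred_list):
--     pairs = list(zip(true_list, pred_list))
--     return tuple(sum(1 for t, p in pairs if t == c and p != c) for c in (0, 1, 2, 3))
-- ===== Notes on version B (the rewrite author's own statement) =====
-- stated objective: alternative
-- what changed: Replaces A's single indexed loop carrying four scalar accumulators with a zip of the two lists followed by four independent staged counting passes (one comprehension-sum per class).
import Mathlib
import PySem

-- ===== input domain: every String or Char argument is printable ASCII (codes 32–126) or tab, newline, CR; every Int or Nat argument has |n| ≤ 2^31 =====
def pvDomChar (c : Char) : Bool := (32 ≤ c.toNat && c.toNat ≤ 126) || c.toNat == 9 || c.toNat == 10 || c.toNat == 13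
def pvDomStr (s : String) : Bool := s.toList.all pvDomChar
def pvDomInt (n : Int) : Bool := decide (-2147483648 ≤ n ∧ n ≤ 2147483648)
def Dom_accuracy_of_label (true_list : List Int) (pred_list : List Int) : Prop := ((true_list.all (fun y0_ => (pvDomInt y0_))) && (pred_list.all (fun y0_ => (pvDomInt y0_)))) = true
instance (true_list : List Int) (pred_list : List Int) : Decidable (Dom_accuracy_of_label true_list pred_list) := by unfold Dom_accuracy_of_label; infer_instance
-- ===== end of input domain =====

-- B zips the two lists once and then counts each class's mismatches in four independent staged passes, instead of A's single indexed loop over four scalar accumulators (objective: alternative).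


-- ===== PORT A =====
-- loop body of A: the four independent if-blocks, one per class (pyGetD's default is never
-- reached inside Pre_: true indices are in range, pred is only read when the label matches)
def pvStepA (true_list pred_list : List Int) (s : Int × Int × Int × Int) (i : Int) : Int × Int × Int × Int :=
  let ti := PySem.List.pyGetD true_list i 0
  let s := if ti = 0 ∧ PySem.List.pyGetD pred_list i 0 ≠ 0 then (s.1 + 1, s.2.1, s.2.2.1, s.2.2.2) else s
  let s := if ti = 1 ∧ PySem.List.pyGetD pred_list i 0 ≠ 1 then (s.1, s.2.1 + 1, s.2.2.1, s.2.2.2) else s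
  let s := if ti = 2 ∧ PySem.List.pyGetD pred_list i 0 ≠ 2 then (s.1, s.2.1, s.2.2.1 + 1, s.2.2.2) else s
  let s := if ti = 3 ∧ PySem.List.pyGetD pred_list i 0 ≠ 3 then (s.1, s.2.1, s.2.2.1, s.2.2.2 + 1) else s
  s

def accuracy_of_label (true_list : List Int) (pred_list : List Int) : Int × Int × Int × Int :=
  (PySem.List.pyRange 0 (true_list.length : Int) 1).foldl (pvStepA true_list pred_list) (0, 0, 0, 0)

-- ===== PORT B =====
-- sum(1 for t, p in pairs if t == c and p != c)
def pvCount (c : Int) (pairs : List (Int × Int)) : Int :=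
  pairs.foldl (fun acc tp => if tp.1 = c ∧ tp.2 ≠ c then acc + 1 else acc) 0

def accuracy_of_label_alt (true_list : List Int) (pred_list : List Int) : Int × Int × Int × Int :=
  let pairs := true_list.zip pred_list
  (pvCount 0 pairs, pvCount 1 pairs, pvCount 2 pairs, pvCount 3 pairs)

-- ===== PRECONDITION & SPEC =====
-- Pre_ excludes exactly the inputs where Python A raises IndexError: an index whose true label is
-- one of 0,1,2,3 but lies beyond pred_list's length.
def Pre_accuracy_of_label (true_list : List Int) (pred_list : List Int) : Prop :=
  ∀ i < true_list.length,
    (true_list.getD i 0 = 0 ∨ true_list.getD i 0 = 1 ∨ true_list.getD i 0 = 2 ∨ true_list.getD i 0 = 3) →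
    i < pred_list.length
instance (true_list : List Int) (pred_list : List Int) : Decidable (Pre_accuracy_of_label true_list pred_list) := by
  unfold Pre_accuracy_of_label; infer_instance

def pvWitness_accuracy_of_label : List Int × List Int := ([0, 1, 2, 3, 7], [0, 2, 2, 1])

def Spec_accuracy_of_label (true_list : List Int) (pred_list : List Int) (out : Int × Int × Int × Int) : Prop := out = accuracy_of_label_alt true_list pred_list
instance (true_list : List Int) (pred_list : List Int) (out : Int × Int × Int × Int) : Decidable (Spec_accuracy_of_label true_list pred_list out) := by unfold Spec_accuracy_of_label; infer_instance

-- ===== CLAIM (what is proved, stated in full; the proofs are below) =====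
def Claim_equal_accuracy_of_label : Prop := ∀ (true_list : List Int) (pred_list : List Int), Dom_accuracy_of_label true_list pred_list → Pre_accuracy_of_label true_list pred_list → Spec_accuracy_of_label true_list pred_list (accuracy_of_label true_list pred_list)


-- ===== LEMMAS AND PROOFS =====

-- A's loop body rephrased on a (true, pred) pair, the shape B's zip exposes
def pvStepZ (s : Int × Int × Int × Int) (tp : Int × Int) : Int × Int × Int × Int :=
  let s := if tp.1 = 0 ∧ tp.2 ≠ 0 then (s.1 + 1, s.2.1, s.2.2.1, s.2.2.2) else s
  let s := if tp.1 = 1 ∧ tp.2 ≠ 1 then (s.1, s.2.1 + 1, s.2.2.1, s.2.2.2) else s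
  let s := if tp.1 = 2 ∧ tp.2 ≠ 2 then (s.1, s.2.1, s.2.2.1 + 1, s.2.2.2) else s
  let s := if tp.1 = 3 ∧ tp.2 ≠ 3 then (s.1, s.2.1, s.2.2.1, s.2.2.2 + 1) else s
  s

theorem pvStepA_eq_stepZ (t p : List Int) (s : Int × Int × Int × Int) (i : Int) :
    pvStepA t p s i = pvStepZ s (PySem.List.pyGetD t i 0, PySem.List.pyGetD p i 0) := rfl

theorem pvPre_tail (x : Int) (t p : List Int)
    (h : Pre_accuracy_of_label (x :: t) p) : Pre_accuracy_of_label t p.tail := by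
  intro i hi hl
  have := h (i + 1) (by simpa using Nat.succ_lt_succ hi) (by simpa using hl)
  cases p with
  | nil => simp at this
  | cons y p' => simpa using Nat.lt_of_succ_lt_succ this

-- A's fold over range(len(true_list)) equals a fold of the pair-step over the zipped lists, inside Pre_
theorem pvLoopA_eq_zip : ∀ (t p : List Int) (s : Int × Int × Int × Int),
    Pre_accuracy_of_label t p →
    (PySem.List.pyRange 0 (t.length : Int) 1).foldl (pvStepA t p) s =
      (t.zip p).foldl pvStepZ s := by
  intro t
  induction t with
  | nil => intro p s _; simp [PySem.List.pyRange_one_eq_nil]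
  | cons x t ih =>
    intro p s hpre
    have hlen : (((x :: t).length : Nat) : Int) = (t.length : Int) + 1 := by
      push_cast [List.length_cons]; ring
    rw [hlen, PySem.List.pyRange_one_cons (by positivity), List.foldl_cons]
    simp only [zero_add]
    -- shift the remaining range [1, n+1) down to [0, n) over the tails
    have hshift : ∀ s' : Int × Int × Int × Int,
        (PySem.List.pyRange 1 ((t.length : Int) + 1) 1).foldl (pvStepA (x :: t) p) s' =
        (PySem.List.pyRange 0 (t.length : Int) 1).foldl (pvStepA t p.tail) s' := by
      intro s'
      rw [PySem.List.pyRange_one, PySem.List.pyRange_one]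
      simp only [add_sub_cancel_right, sub_zero, Int.toNat_natCast, List.foldl_map]
      congr 1
      funext s'' k
      rw [pvStepA_eq_stepZ, pvStepA_eq_stepZ]
      have h1 : (1 : Int) + (k : Int) = ((k + 1 : Nat) : Int) := by push_cast; ring
      have h0 : (0 : Int) + (k : Int) = ((k : Nat) : Int) := by push_cast; ring
      rw [h1, h0, PySem.List.pyGetD_natCast, PySem.List.pyGetD_natCast,
          PySem.List.pyGetD_natCast, PySem.List.pyGetD_natCast]
      simp
    rw [hshift, ih p.tail _ (pvPre_tail x t p hpre)]
    -- identify the head step with the zip head (or show it is a no-op when p = [])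
    cases p with
    | nil =>
      have hx := hpre 0 (by simp)
      simp only [List.length_nil, Nat.lt_irrefl] at hx
      have : ¬ ((x :: t).getD 0 0 = 0 ∨ (x :: t).getD 0 0 = 1 ∨
                (x :: t).getD 0 0 = 2 ∨ (x :: t).getD 0 0 = 3) := fun h => hx h
      simp only [List.getD_cons_zero] at this
      push Not at this
      obtain ⟨h0, h1, h2, h3⟩ := this
      simp [pvStepA, PySem.List.pyGetD_zero_cons, h0, h1, h2, h3]
    | cons y p' =>
      rw [pvStepA_eq_stepZ]
      simp [PySem.List.pyGetD_zero_cons, pvStepZ]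

-- starting a counting fold from x just adds x
theorem pvCount_from (c : Int) : ∀ (pairs : List (Int × Int)) (x : Int),
    pairs.foldl (fun acc tp => if tp.1 = c ∧ tp.2 ≠ c then acc + 1 else acc) x =
      x + pvCount c pairs := by
  intro pairs
  induction pairs with
  | nil => intro x; simp [pvCount]
  | cons tp ps ih =>
    intro x
    rw [List.foldl_cons, ih]
    have h2 : pvCount c (tp :: ps) =
        (if tp.1 = c ∧ tp.2 ≠ c then (1 : Int) else 0) + pvCount c ps := by
      simp only [pvCount, List.foldl_cons]
      rw [ih]
      split_ifs <;> simp only [pvCount] <;> ring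
    rw [h2]
    split_ifs <;> ring

theorem pvCount_cons (c : Int) (tp : Int × Int) (ps : List (Int × Int)) :
    pvCount c (tp :: ps) = (if tp.1 = c ∧ tp.2 ≠ c then (1 : Int) else 0) + pvCount c ps := by
  simp only [pvCount, List.foldl_cons]
  rw [pvCount_from]
  split_ifs <;> simp only [pvCount] <;> ring

-- the pair-step fold splits into B's four independent counting passes
theorem pvFoldZ_eq_counts : ∀ (pairs : List (Int × Int)) (a f g k : Int),
    pairs.foldl pvStepZ (a, f, g, k) =
      (a + pvCount 0 pairs, f + pvCount 1 pairs, g + pvCount 2 pairs, k + pvCount 3 pairs) := by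
  intro pairs
  induction pairs with
  | nil => intro a f g k; simp [pvCount]
  | cons tp ps ih =>
    intro a f g k
    have hstep : pvStepZ (a, f, g, k) tp =
        (a + if tp.1 = 0 ∧ tp.2 ≠ 0 then 1 else 0,
         f + if tp.1 = 1 ∧ tp.2 ≠ 1 then 1 else 0,
         g + if tp.1 = 2 ∧ tp.2 ≠ 2 then 1 else 0,
         k + if tp.1 = 3 ∧ tp.2 ≠ 3 then 1 else 0) := by
      simp only [pvStepZ]; split_ifs <;> simp
    rw [List.foldl_cons, hstep, ih,
        pvCount_cons 0, pvCount_cons 1, pvCount_cons 2, pvCount_cons 3]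
    simp only [Prod.mk.injEq]
    refine ⟨?_, ?_, ?_, ?_⟩ <;> split_ifs <;> ring

-- ===== VERDICT (by name: the statements are the Claim_ definitions above) =====
theorem accuracy_of_label_spec : Claim_equal_accuracy_of_label := by
  intro t p _ hpre
  unfold Spec_accuracy_of_label
  show accuracy_of_label t p = accuracy_of_label_alt t p
  rw [accuracy_of_label, pvLoopA_eq_zip t p _ hpre, pvFoldZ_eq_counts]
  simp [accuracy_of_label_alt]
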